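-- pv_equiv track=rewrite | github.com/SauravSinha76/scaler | class44/Ath_magic_number.py | solve
-- ===== SOURCE A (Python) =====
-- def gcd(A,B):
--     if B == 0:
--         return A
--     return gcd(B, A%B)
--
-- def lcm(A,B):
--     return (A*B) // gcd(A,B)
--
-- def count_magic(B,C,mid):
--     return mid // B + mid // C - mid // lcm(B,C)
--
-- def solve(A,B,C):
--
--     l = min(B,C)
--     r = A*min(B,C)
--     ans = -1
--     while l <= r:
--         mid = (l+r) // 2
--         pos = count_magic(B,C,mid)
--
--         if pos >= A:
--             ans = mid
--             r = mid -1
--         else: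
--             l = mid + 1
--     return ans
-- ===== SOURCE B (Python) =====
-- def solve(A, B, C):
--     # Closed-form estimate + constant-step walk instead of a binary search.
--     # Magic numbers exist only for positive A, B, C; otherwise return -1.
--     if A <= 0 or B <= 0 or C <= 0:
--         return -1
--     b, c = B, C
--     while c:
--         b, c = c, b % c
--     g = b
--     L = B // g * C                      # lcm(B, C)
--     d = L // B + L // C - 1             # magic numbers per period of length L
--     # start below the answer: count(m) < A is guaranteed here
--     m = (A - 3) * L // d
--     if m < 0:
--         m = 0
--     cnt = m // B + m // C - m // L
--     # hop magic number by magic number (at most a handful of hops)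
--     while cnt < A:
--         m = min((m // B + 1) * B, (m // C + 1) * C)
--         cnt += 1
--     return m
-- ===== Notes on version B (the rewrite author's own statement) =====
-- stated objective: alternative
-- what changed: Replaces (same asymptotic cost in practice, dominated by gcd) A's binary search over [min(B,C), A*min(B,C)] (recomputing gcd/lcm in every probe) by a single gcd, a closed-form estimate of the answer's position from the density of magic numbers per lcm period, and a constant number of next-multiple hops up to the A-th magic number; Pre_ excludes nonpositive-divisor inputs where A raises ZeroDivisionError or its reversed/negative binary-search range returns accidental loop-state values.
-- outside the precondition, e.g. on solve(1, -3, -3): A returns -3, B returns -1; on solve(-1, -2, 3): A returns -2, B returns -1; on solve(1, 0, 5): A raises ZeroDivisionError, B returns -1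
import Mathlib
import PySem

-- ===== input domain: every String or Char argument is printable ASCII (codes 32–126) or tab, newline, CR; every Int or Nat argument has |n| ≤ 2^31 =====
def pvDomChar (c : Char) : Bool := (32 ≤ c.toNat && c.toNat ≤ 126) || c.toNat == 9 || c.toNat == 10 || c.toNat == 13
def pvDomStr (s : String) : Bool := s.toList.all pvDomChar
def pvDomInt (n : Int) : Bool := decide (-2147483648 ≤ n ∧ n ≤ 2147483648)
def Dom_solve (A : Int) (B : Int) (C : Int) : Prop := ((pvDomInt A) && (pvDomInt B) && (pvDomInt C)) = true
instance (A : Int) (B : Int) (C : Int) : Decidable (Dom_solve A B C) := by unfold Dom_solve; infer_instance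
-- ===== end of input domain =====

-- B replaces A's binary search on the count by a closed-form position estimate plus a
-- constant number of next-multiple hops (objective: alternative algorithm, similar cost).

-- termination helper for Euclid's recursion with Python's mod (cited in decreasing_by)
theorem pvModNatAbsLt (a b : Int) (hb : ¬ b = 0) : (PySem.Int.mod a b).natAbs < b.natAbs := by
  rcases lt_or_gt_of_ne hb with h | h
  · have := PySem.Int.mod_neg_bounds a h; omega
  · have h1 := PySem.Int.mod_nonneg a h; have h2 := PySem.Int.mod_lt a h; omega

-- ===== PORT A =====
def gcdA (a b : Int) : Int :=
  if h : b = 0 then a else gcdA b (PySem.Int.mod a b)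
termination_by b.natAbs
decreasing_by exact pvModNatAbsLt a b h

def lcmA (a b : Int) : Int := PySem.Int.floordiv (a * b) (gcdA a b)

def count_magic (B C mid : Int) : Int :=
  PySem.Int.floordiv mid B + PySem.Int.floordiv mid C - PySem.Int.floordiv mid (lcmA B C)

def solveLoop (A B C l r ans : Int) : Int :=
  if h : l ≤ r then
    let mid := PySem.Int.floordiv (l + r) 2
    let pos := count_magic B C mid
    if pos ≥ A then solveLoop A B C l (mid - 1) mid
    else solveLoop A B C (mid + 1) r ans
  else ans
termination_by (r + 1 - l).toNat
decreasing_by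
  · have := PySem.Int.floordiv_two_mid_bounds h; omega
  · have := PySem.Int.floordiv_two_mid_bounds h; omega

def solve (A : Int) (B : Int) (C : Int) : Int :=
  solveLoop A B C (min B C) (A * min B C) (-1)

-- ===== PORT B =====
-- while c: b, c = c, b % c
def gcdB (b c : Int) : Int :=
  if h : c = 0 then b else gcdB c (PySem.Int.mod b c)
termination_by c.natAbs
decreasing_by exact pvModNatAbsLt b c h

-- while cnt < A: m = min(next multiple of B, next multiple of C); cnt += 1
def walkB (A B C L m cnt : Int) : Int :=
  if h : cnt < A then
    walkB A B C L
      (min ((PySem.Int.floordiv m B + 1) * B) ((PySem.Int.floordiv m C + 1) * C)) (cnt + 1)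
  else m
termination_by (A - cnt).toNat
decreasing_by omega

def solve_alt (A : Int) (B : Int) (C : Int) : Int :=
  if A ≤ 0 ∨ B ≤ 0 ∨ C ≤ 0 then -1
  else
    let g := gcdB B C
    let L := PySem.Int.floordiv B g * C
    let d := PySem.Int.floordiv L B + PySem.Int.floordiv L C - 1
    let m0 := PySem.Int.floordiv ((A - 3) * L) d
    let m := if m0 < 0 then 0 else m0
    walkB A B C L m
      (PySem.Int.floordiv m B + PySem.Int.floordiv m C - PySem.Int.floordiv m L)

-- ===== PRECONDITION & SPEC =====
-- Pre_ excludes inputs with a nonpositive divisor where the task is meaningless and A's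
-- behaviour is accidental: with B = 0 or C = 0 A raises ZeroDivisionError once its loop runs,
-- and with min(B,C) < 0 and A ≤ 1 A's binary search over a reversed/negative range returns
-- leftover values of its loop state; the region min(B,C) < 0 with A ≥ 2 (where A's loop is
-- simply skipped and both return -1) stays admitted.
def Pre_solve (A : Int) (B : Int) (C : Int) : Prop :=
  (1 ≤ B ∧ 1 ≤ C) ∨ (2 ≤ A ∧ min B C < 0)
instance (A : Int) (B : Int) (C : Int) : Decidable (Pre_solve A B C) := by
  unfold Pre_solve; infer_instance

def pvWitness_solve : Int × Int × Int := (3, 2, 3)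

def Spec_solve (A : Int) (B : Int) (C : Int) (out : Int) : Prop := out = solve_alt A B C
instance (A : Int) (B : Int) (C : Int) (out : Int) : Decidable (Spec_solve A B C out) := by
  unfold Spec_solve; infer_instance

-- ===== CLAIM (what is proved, stated in full; the proofs are below) =====
def Claim_equal_solve : Prop :=
  ∀ (A : Int) (B : Int) (C : Int), Dom_solve A B C → Pre_solve A B C →
    Spec_solve A B C (solve A B C)

-- ===== LEMMAS AND PROOFS =====

-- the common count function, over Euclidean division (= Python floor division for positive divisors)
def cntf (B C L m : Int) : Int := m / B + m / C - m / L

theorem ediv_of_lt_next (d m x : Int) (hd : 0 < d) (h1 : m ≤ x) (h2 : x < (m / d + 1) * d) :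
    x / d = m / d := by
  have hlow : m / d * d ≤ m := Int.ediv_mul_le m (by omega)
  have hge : m / d ≤ x / d := (Int.le_ediv_iff_mul_le hd).2 (by omega)
  have hlt : x / d < m / d + 1 := (Int.ediv_lt_iff_lt_mul hd).2 h2
  omega

theorem next_mult_least (d m x : Int) (hd : 0 < d) (hdx : d ∣ x) (hmx : m < x) :
    (m / d + 1) * d ≤ x := by
  obtain ⟨k, rfl⟩ := hdx
  have hlow : m / d * d ≤ m := Int.ediv_mul_le m (by omega)
  have : m / d < k := by nlinarith [mul_comm d k]
  nlinarith

theorem next_self_gt (d m : Int) (hd : 0 < d) : m < (m / d + 1) * d :=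
  Int.lt_ediv_add_one_mul_self m hd

def nextM (B C m : Int) : Int := min ((m / B + 1) * B) ((m / C + 1) * C)

theorem lt_nextM (B C m : Int) (hB : 0 < B) (hC : 0 < C) : m < nextM B C m :=
  lt_min (next_self_gt B m hB) (next_self_gt C m hC)

theorem cntf_comm (B C L m : Int) : cntf B C L m = cntf C B L m := by
  unfold cntf; ring

theorem cnt_const (B C L m x : Int) (hB : 0 < B) (hC : 0 < C) (hL : 0 < L)
    (hBL : B ∣ L) (h1 : m ≤ x) (h2 : x < nextM B C m) :
    cntf B C L x = cntf B C L m := by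
  have hnb : x < (m / B + 1) * B := lt_of_lt_of_le h2 (min_le_left _ _)
  have hnc : x < (m / C + 1) * C := lt_of_lt_of_le h2 (min_le_right _ _)
  have hBnL : (m / B + 1) * B ≤ (m / L + 1) * L :=
    next_mult_least B m _ hB (Dvd.dvd.mul_left hBL _) (next_self_gt L m hL)
  have e1 := ediv_of_lt_next B m x hB h1 hnb
  have e2 := ediv_of_lt_next C m x hC h1 hnc
  have e3 := ediv_of_lt_next L m x hL h1 (by omega)
  unfold cntf; omega

-- one-sided: the next multiple of B comes no later than that of C
theorem cnt_next_le (B C L m : Int) (hB : 0 < B) (hC : 0 < C) (hL : 0 < L)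
    (hBL : B ∣ L) (hCL : C ∣ L) (hlcm : ∀ x : Int, B ∣ x → C ∣ x → L ∣ x)
    (hle : (m / B + 1) * B ≤ (m / C + 1) * C) :
    cntf B C L (nextM B C m) = cntf B C L m + 1 := by
  set nb := (m / B + 1) * B with hnb
  set nc := (m / C + 1) * C with hnc
  have hmin : nextM B C m = nb := min_eq_left hle
  have hmb : m < nb := next_self_gt B m hB
  have hdB : B ∣ nb := Dvd.intro_left _ rfl
  have enb : nb / B = m / B + 1 := by rw [hnb, Int.mul_ediv_cancel _ (by omega)]
  have hBnL : nb ≤ (m / L + 1) * L :=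
    next_mult_least B m _ hB (Dvd.dvd.mul_left hBL _) (next_self_gt L m hL)
  rcases eq_or_lt_of_le hle with heq | hlt
  · -- tie: nb = nc, divisible by both, hence the next multiple of L
    have hdC : C ∣ nb := heq ▸ Dvd.intro_left _ rfl
    have hdL : L ∣ nb := hlcm nb hdB hdC
    have hnL : (m / L + 1) * L ≤ nb := next_mult_least L m nb hL hdL hmb
    have hnbL : nb = (m / L + 1) * L := le_antisymm hBnL hnL
    have enc : nb / C = m / C + 1 := by rw [heq, hnc, Int.mul_ediv_cancel _ (by omega)]
    have enl : nb / L = m / L + 1 := by rw [hnbL, Int.mul_ediv_cancel _ (by omega)]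
    rw [hmin]; unfold cntf; omega
  · -- strict: nb is not a multiple of C, hence not of L
    have hndC : ¬ C ∣ nb := fun hdvd => absurd (next_mult_least C m nb hC hdvd hmb) (by omega)
    have hndL : ¬ L ∣ nb := fun hdvd => hndC (dvd_trans hCL hdvd)
    have enc : nb / C = m / C := ediv_of_lt_next C m nb hC (le_of_lt hmb) hlt
    have hnbL : nb < (m / L + 1) * L :=
      lt_of_le_of_ne hBnL (fun he => hndL (he ▸ Dvd.intro_left _ rfl))
    have enl : nb / L = m / L := ediv_of_lt_next L m nb hL (le_of_lt hmb) hnbL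
    rw [hmin]; unfold cntf; omega

theorem cnt_next (B C L m : Int) (hB : 0 < B) (hC : 0 < C) (hL : 0 < L)
    (hBL : B ∣ L) (hCL : C ∣ L) (hlcm : ∀ x : Int, B ∣ x → C ∣ x → L ∣ x) :
    cntf B C L (nextM B C m) = cntf B C L m + 1 := by
  rcases le_total ((m / B + 1) * B) ((m / C + 1) * C) with h | h
  · exact cnt_next_le B C L m hB hC hL hBL hCL hlcm h
  · have := cnt_next_le C B L m hC hB hL hCL hBL (fun x h1 h2 => hlcm x h2 h1) h
    rw [cntf_comm, show nextM B C m = nextM C B m from min_comm _ _, this, cntf_comm]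

theorem cnt_mono (B C L : Int) (hB : 0 < B) (hC : 0 < C) (hL : 0 < L)
    (hBL : B ∣ L) (hCL : C ∣ L) (hlcm : ∀ x : Int, B ∣ x → C ∣ x → L ∣ x) :
    ∀ (n : Nat) (m m' : Int), m ≤ m' → (m' - m).toNat ≤ n →
      cntf B C L m ≤ cntf B C L m' := by
  intro n
  induction n with
  | zero =>
    intro m m' h1 h2
    have hmm : m = m' := by omega
    subst hmm; exact le_refl _
  | succ k ih =>
    intro m m' h1 h2
    rcases lt_or_ge m' (nextM B C m) with h | h
    · rw [cnt_const B C L m m' hB hC hL hBL h1 h]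
    · have hlt := lt_nextM B C m hB hC
      have := ih (nextM B C m) m' h (by omega)
      have := cnt_next B C L m hB hC hL hBL hCL hlcm
      omega

theorem ediv_le_ediv_divisor (x C L : Int) (h0 : 0 ≤ x) (hC : 0 < C) (hCL : C ≤ L) :
    x / L ≤ x / C := by
  have hL : (0:Int) < L := by omega
  have h1 : 0 ≤ x / L := Int.ediv_nonneg h0 (by omega)
  have h2 : x / L * L ≤ x := Int.ediv_mul_le x (by omega)
  exact (Int.le_ediv_iff_mul_le hC).2 (le_trans (by nlinarith) h2)

theorem cnt_neg (B C L x : Int) (hB : 0 < B) (hC : 0 < C) (hL : 0 < L)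
    (hBLle : B ≤ L) (hx : x < 0) : cntf B C L x < 0 := by
  have h1 : x / B < 0 := (Int.ediv_lt_iff_lt_mul hB).2 (by omega)
  have h2 : x / C < 0 := (Int.ediv_lt_iff_lt_mul hC).2 (by omega)
  have h3 : x / B ≤ x / L := by
    have hxB : x / B ≤ 0 := by omega
    have hlow : x / B * B ≤ x := Int.ediv_mul_le x (by omega)
    exact (Int.le_ediv_iff_mul_le hL).2 (le_trans (by nlinarith) hlow)
  unfold cntf; omega

theorem cnt_zero (B C L : Int) : cntf B C L 0 = 0 := by unfold cntf; simp

theorem cnt_small (B C L x : Int) (hB : 0 < B) (hC : 0 < C) (hL : 0 < L)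
    (hBLle : B ≤ L) (h0 : 0 ≤ x) (hxB : x < B) (hxC : x < C) : cntf B C L x = 0 := by
  have e1 : x / B = 0 := Int.ediv_eq_zero_of_lt h0 hxB
  have e2 : x / C = 0 := Int.ediv_eq_zero_of_lt h0 hxC
  have e3 : x / L = 0 := Int.ediv_eq_zero_of_lt h0 (by omega)
  unfold cntf; omega

-- count at A*B is at least A (C ∣ L, so the subtracted term never exceeds the C term)
theorem cnt_at_mult (A B C L : Int) (hA : 1 ≤ A) (hB : 0 < B) (hC : 0 < C) (hL : 0 < L)
    (hCL : C ∣ L) : A ≤ cntf B C L (A * B) := by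
  have e1 : A * B / B = A := Int.mul_ediv_cancel A (by omega)
  have hCleL : C ≤ L := Int.le_of_dvd hL hCL
  have h2 : A * B / L ≤ A * B / C :=
    ediv_le_ediv_divisor (A * B) C L (by positivity) hC hCleL
  unfold cntf; omega

theorem gcdA_eq_gcd : ∀ (k : Nat) (m n : Nat), n ≤ k →
    gcdA (m : Int) (n : Int) = (Nat.gcd m n : Int) := by
  intro k
  induction k with
  | zero =>
    intro m n hn
    have h0 : n = 0 := by omega
    subst h0; rw [gcdA]; simp
  | succ j ih =>
    intro m n hn
    by_cases h0 : n = 0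
    · subst h0; rw [gcdA]; simp
    · rw [gcdA]
      have hne : (n : Int) ≠ 0 := by exact_mod_cast h0
      simp only [hne, dite_false]
      rw [PySem.Int.mod_natCast]
      have hlt : m % n < n := Nat.mod_lt m (by omega)
      rw [ih n (m % n) (by omega)]
      rw [Nat.gcd_comm n (m % n), ← Nat.gcd_rec n m, Nat.gcd_comm]

theorem gcdB_eq_gcd : ∀ (k : Nat) (m n : Nat), n ≤ k →
    gcdB (m : Int) (n : Int) = (Nat.gcd m n : Int) := by
  intro k
  induction k with
  | zero =>
    intro m n hn
    have h0 : n = 0 := by omega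
    subst h0; rw [gcdB]; simp
  | succ j ih =>
    intro m n hn
    by_cases h0 : n = 0
    · subst h0; rw [gcdB]; simp
    · rw [gcdB]
      have hne : (n : Int) ≠ 0 := by exact_mod_cast h0
      simp only [hne, dite_false]
      rw [PySem.Int.mod_natCast]
      have hlt : m % n < n := Nat.mod_lt m (by omega)
      rw [ih n (m % n) (by omega)]
      rw [Nat.gcd_comm n (m % n), ← Nat.gcd_rec n m, Nat.gcd_comm]

-- the estimate the walk starts from is strictly below the target count
theorem cnt_est (A B C L m0 : Int) (hA : 1 ≤ A) (hB : 0 < B) (hC : 0 < C) (hL : 0 < L)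
    (hBL : B ∣ L) (hCL : C ∣ L)
    (hm0 : m0 = (A - 3) * L / (L / B + L / C - 1)) (h0 : 0 ≤ m0) :
    cntf B C L m0 < A := by
  have eB : L / B * B = L := Int.ediv_mul_cancel hBL
  have eC : L / C * C = L := Int.ediv_mul_cancel hCL
  have hlB : 1 ≤ L / B := by nlinarith [Int.ediv_nonneg (le_of_lt hL) (le_of_lt hB)]
  have hlC : 1 ≤ L / C := by nlinarith [Int.ediv_nonneg (le_of_lt hL) (le_of_lt hC)]
  set lB := L / B with hlBdef
  set lC := L / C with hlCdef
  set d := lB + lC - 1 with hd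
  have hdpos : 0 < d := by omega
  have hqb : m0 / B * B ≤ m0 := Int.ediv_mul_le m0 (by omega)
  have hqc : m0 / C * C ≤ m0 := Int.ediv_mul_le m0 (by omega)
  have hql : m0 < (m0 / L + 1) * L := Int.lt_ediv_add_one_mul_self m0 hL
  have h1 : m0 / B * L ≤ m0 * lB := by
    calc m0 / B * L = m0 / B * B * lB := by rw [← eB]; ring
    _ ≤ m0 * lB := mul_le_mul_of_nonneg_right hqb (by omega)
  have h2 : m0 / C * L ≤ m0 * lC := by
    calc m0 / C * L = m0 / C * C * lC := by rw [← eC]; ring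
    _ ≤ m0 * lC := mul_le_mul_of_nonneg_right hqc (by omega)
  have h3 : -(m0 / L * L) < L - m0 := by nlinarith
  have h5 : m0 * d ≤ (A - 3) * L := by
    rw [hm0]; exact Int.ediv_mul_le ((A - 3) * L) (by omega)
  have h4 : m0 * d = m0 * lB + m0 * lC - m0 := by rw [hd]; ring
  have hexp : (m0 / B + m0 / C - m0 / L) * L = m0 / B * L + m0 / C * L - m0 / L * L := by ring
  have hmul : (m0 / B + m0 / C - m0 / L) * L < (A - 2) * L := by
    rw [hexp]; nlinarith
  have := lt_of_mul_lt_mul_right hmul (le_of_lt hL)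
  unfold cntf; omega

-- A's binary search returns T, the least integer whose count reaches A
theorem loop_eq (A B C L T : Int) (hB : 0 < B) (hC : 0 < C) (hL : 0 < L)
    (hBL : B ∣ L) (hCL : C ∣ L) (hlcm : ∀ x : Int, B ∣ x → C ∣ x → L ∣ x)
    (hcm : ∀ m : Int, count_magic B C m = cntf B C L m)
    (hT1 : A ≤ cntf B C L T)
    (hT2 : ∀ x : Int, x < T → cntf B C L x < A) :
    ∀ (n : Nat) (l r ans : Int), (r + 1 - l).toNat ≤ n →
      (∀ x : Int, x < l → cntf B C L x < A) →
      (T ≤ r ∨ (ans = T ∧ r < T)) →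
      solveLoop A B C l r ans = T := by
  intro n
  induction n with
  | zero =>
    intro l r ans hfuel hinv hdisj
    have hlr : ¬ l ≤ r := by omega
    rw [solveLoop, dif_neg hlr]
    rcases hdisj with h | ⟨h, _⟩
    · exact absurd hT1 (by have := hinv T (by omega); omega)
    · exact h
  | succ k ih =>
    intro l r ans hfuel hinv hdisj
    by_cases hlr : l ≤ r
    · rw [solveLoop, dif_pos hlr]
      have hmid := PySem.Int.floordiv_two_mid_bounds hlr
      set mid := PySem.Int.floordiv (l + r) 2 with hmiddef
      simp only [hcm]
      split_ifs with hpos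
      · -- count at mid reaches A: T ≤ mid
        have hTle : T ≤ mid := by
          by_contra hlt
          have := hT2 mid (by omega)
          omega
        rcases lt_or_ge (T) mid with hTlt | hTge
        · exact ih l (mid - 1) mid (by omega) hinv (Or.inl (by omega))
        · have hTeq : T = mid := by omega
          exact ih l (mid - 1) mid (by omega) hinv (Or.inr (by omega))
      · -- count at mid below A: mid < T
        have hmidT : mid < T := by
          by_contra hge
          have := cnt_mono B C L hB hC hL hBL hCL hlcm (mid - T).toNat T mid (by omega) (by omega)
          omega
        refine ih (mid + 1) r ans (by omega) ?_ ?_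
        · intro x hx
          have := cnt_mono B C L hB hC hL hBL hCL hlcm (mid - x).toNat x mid (by omega) (by omega)
          omega
        · rcases hdisj with h | h
          · rcases lt_or_ge r T with hrT | hrT
            · exact Or.inr ⟨by omega, hrT⟩
            · exact Or.inl hrT
          · exact Or.inr h
    · rw [solveLoop, dif_neg hlr]
      rcases hdisj with h | ⟨h, _⟩
      · exact absurd hT1 (by have := hinv T (by omega); omega)
      · exact h

-- B's walk returns the same T
theorem walk_eq (A B C L T : Int) (hB : 0 < B) (hC : 0 < C) (hL : 0 < L)
    (hBL : B ∣ L) (hCL : C ∣ L) (hlcm : ∀ x : Int, B ∣ x → C ∣ x → L ∣ x)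
    (hT1 : A ≤ cntf B C L T)
    (hT2 : ∀ x : Int, x < T → cntf B C L x < A) :
    ∀ (n : Nat) (m c : Int), (A - c).toNat ≤ n → c = cntf B C L m → m ≤ T →
      walkB A B C L m c = T := by
  intro n
  induction n with
  | zero =>
    intro m c hfuel hc hm
    have hcA : ¬ c < A := by omega
    rw [walkB, dif_neg hcA]
    have : ¬ m < T := fun h => by have := hT2 m h; omega
    omega
  | succ k ih =>
    intro m c hfuel hc hm
    by_cases hcA : c < A
    · rw [walkB, dif_pos hcA]
      rw [PySem.Int.floordiv_eq_ediv_of_pos hB, PySem.Int.floordiv_eq_ediv_of_pos hC]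
      have hnext : cntf B C L (nextM B C m) = cntf B C L m + 1 :=
        cnt_next B C L m hB hC hL hBL hCL hlcm
      have hnT : nextM B C m ≤ T := by
        by_contra hgt
        have := cnt_const B C L m T hB hC hL hBL hm (by omega)
        omega
      exact ih (nextM B C m) (c + 1) (by omega) (by rw [hnext, ← hc]) hnT
    · rw [walkB, dif_neg hcA]
      have : ¬ m < T := fun h => by have := hT2 m h; omega
      omega


-- bridge: A's count_magic is cntf at L (positive B, C)
theorem lcm_ediv_eq (B C : Int) (hB : 1 ≤ B) (hC : 1 ≤ C) :
    B * C / (Int.gcd B C : Int) = (Int.lcm B C : Int) := by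
  have hg : Int.gcd B C ≠ 0 := by simp [Int.gcd_eq_zero_iff]; omega
  have h1 : B * C = ((B.natAbs * C.natAbs : Nat) : Int) := by
    push_cast [Int.natAbs_of_nonneg (by omega : (0:Int) ≤ B),
      Int.natAbs_of_nonneg (by omega : (0:Int) ≤ C)]
    ring
  have h2 : B.natAbs * C.natAbs = Int.gcd B C * Int.lcm B C := (Nat.gcd_mul_lcm _ _).symm
  rw [h1, h2]
  push_cast
  exact Int.mul_ediv_cancel_left _ (by exact_mod_cast hg)

-- the main case: positive A, B, C — both programs return the least m with count m ≥ A
theorem main_case (A B C : Int) (hA : 1 ≤ A) (hB : 1 ≤ B) (hC : 1 ≤ C) :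
    solve A B C = solve_alt A B C := by
  -- gcd and the shared lcm L
  have hgpos : (0:Int) < (Int.gcd B C : Int) := by
    have : Int.gcd B C ≠ 0 := by simp [Int.gcd_eq_zero_iff]; omega
    positivity
  set gZ : Int := (Int.gcd B C : Int) with hgZ
  have hgB : gZ ∣ B := Int.gcd_dvd_left _ _
  have hgC : gZ ∣ C := Int.gcd_dvd_right _ _
  set L : Int := B * C / gZ with hLdef
  have hLlcm : L = (Int.lcm B C : Int) := lcm_ediv_eq B C hB hC
  obtain ⟨b', hb'⟩ := hgB
  obtain ⟨c', hc'⟩ := hgC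
  have hLb : L = B * c' := by
    rw [hLdef, hc', ← mul_assoc, mul_comm B gZ, mul_assoc]
    exact Int.mul_ediv_cancel_left _ (by omega)
  have hLc : L = b' * C := by
    rw [hLdef, hb', mul_assoc]
    exact Int.mul_ediv_cancel_left _ (by omega)
  have hc'pos : 0 < c' := by nlinarith
  have hBL : B ∣ L := ⟨c', hLb⟩
  have hCL : C ∣ L := Dvd.intro_left b' hLc.symm
  have hL : 0 < L := by rw [hLb]; positivity
  have hlcm : ∀ x : Int, B ∣ x → C ∣ x → L ∣ x := fun x h1 h2 =>
    hLlcm ▸ (Int.coe_lcm B C ▸ lcm_dvd h1 h2)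
  have hBLle : B ≤ L := Int.le_of_dvd hL hBL
  have hCLle : C ≤ L := Int.le_of_dvd hL hCL
  -- both gcd helpers compute gZ
  have hcastB : ((B.toNat : Nat) : Int) = B := Int.toNat_of_nonneg (by omega)
  have hcastC : ((C.toNat : Nat) : Int) = C := Int.toNat_of_nonneg (by omega)
  have hgnat : (Nat.gcd B.toNat C.toNat : Int) = gZ := by
    rw [hgZ]; unfold Int.gcd
    congr 2 <;> omega
  have hgA : gcdA B C = gZ := by
    rw [← hcastB, ← hcastC, gcdA_eq_gcd C.toNat B.toNat C.toNat (le_refl _), hgnat]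
  have hgB2 : gcdB B C = gZ := by
    rw [← hcastB, ← hcastC, gcdB_eq_gcd C.toNat B.toNat C.toNat (le_refl _), hgnat]
  -- bridge for count_magic
  have hcm : ∀ m : Int, count_magic B C m = cntf B C L m := by
    intro m
    unfold count_magic lcmA cntf
    rw [hgA,
      PySem.Int.floordiv_eq_ediv_of_pos hgpos,
      PySem.Int.floordiv_eq_ediv_of_pos (by omega : (0:Int) < B),
      PySem.Int.floordiv_eq_ediv_of_pos (by omega : (0:Int) < C), ← hLdef,
      PySem.Int.floordiv_eq_ediv_of_pos hL]
  -- the target T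
  have hEx : ∃ n : Nat, A ≤ cntf B C L (n : Int) := by
    rcases le_total B C with hbc | hbc
    · refine ⟨(A * B).toNat, ?_⟩
      rw [Int.toNat_of_nonneg (by positivity)]
      exact cnt_at_mult A B C L hA (by omega) (by omega) hL hCL
    · refine ⟨(A * C).toNat, ?_⟩
      rw [Int.toNat_of_nonneg (by positivity)]
      rw [cntf_comm]
      exact cnt_at_mult A C B L hA (by omega) (by omega) hL hBL
  set T : Nat := Nat.find hEx with hTdef
  have hT1 : A ≤ cntf B C L (T : Int) := Nat.find_spec hEx
  have hT2 : ∀ x : Int, x < (T : Int) → cntf B C L x < A := by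
    intro x hx
    rcases lt_or_ge x 0 with hneg | hpos
    · have := cnt_neg B C L x (by omega) (by omega) hL hBLle hneg; omega
    · have hxT : x.toNat < T := by omega
      have := Nat.find_min hEx hxT
      rw [Int.toNat_of_nonneg hpos] at this
      omega
  -- A's side
  have hAside : solve A B C = (T : Int) := by
    unfold solve
    rcases le_total B C with hbc | hbc
    · rw [min_eq_left hbc]
      refine loop_eq A B C L (T : Int) (by omega) (by omega) hL hBL hCL hlcm hcm hT1 hT2
        (A * B + 1 - B).toNat B (A * B) (-1) (le_refl _) ?_ (Or.inl ?_)
      · intro x hx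
        rcases lt_or_ge x 0 with hneg | hpos
        · have := cnt_neg B C L x (by omega) (by omega) hL hBLle hneg; omega
        · rw [cnt_small B C L x (by omega) (by omega) hL hBLle hpos (by omega) (by omega)]
          omega
      · have : T ≤ (A * B).toNat := Nat.find_le (by
          rw [Int.toNat_of_nonneg (by positivity)]
          exact cnt_at_mult A B C L hA (by omega) (by omega) hL hCL)
        have h0 : (0:Int) ≤ A * B := by positivity
        omega
    · rw [min_eq_right hbc]
      refine loop_eq A B C L (T : Int) (by omega) (by omega) hL hBL hCL hlcm hcm hT1 hT2
        (A * C + 1 - C).toNat C (A * C) (-1) (le_refl _) ?_ (Or.inl ?_)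
      · intro x hx
        rcases lt_or_ge x 0 with hneg | hpos
        · have := cnt_neg B C L x (by omega) (by omega) hL hBLle hneg; omega
        · rw [cnt_small B C L x (by omega) (by omega) hL hBLle hpos (by omega) (by omega)]
          omega
      · have : T ≤ (A * C).toNat := Nat.find_le (by
          rw [Int.toNat_of_nonneg (by positivity)]
          rw [cntf_comm]
          exact cnt_at_mult A C B L hA (by omega) (by omega) hL hBL)
        have h0 : (0:Int) ≤ A * C := by positivity
        omega
  -- B's side
  have hBside : solve_alt A B C = (T : Int) := by
    simp only [solve_alt]
    rw [if_neg (by omega)]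
    rw [hgB2]
    have hLB : PySem.Int.floordiv B gZ * C = L := by
      rw [PySem.Int.floordiv_eq_ediv_of_pos hgpos, hb', Int.mul_ediv_cancel_left _ (by omega),
        ← hLc]
    rw [hLB]
    have hlB : 1 ≤ L / B := by
      have e := Int.ediv_mul_cancel hBL
      nlinarith [Int.ediv_nonneg (le_of_lt hL) (by omega : (0:Int) ≤ B)]
    have hlC : 1 ≤ L / C := by
      have e := Int.ediv_mul_cancel hCL
      nlinarith [Int.ediv_nonneg (le_of_lt hL) (by omega : (0:Int) ≤ C)]
    have hdpos : (0:Int) < L / B + L / C - 1 := by omega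
    simp only [PySem.Int.floordiv_eq_ediv_of_pos (by omega : (0:Int) < B),
      PySem.Int.floordiv_eq_ediv_of_pos (by omega : (0:Int) < C),
      PySem.Int.floordiv_eq_ediv_of_pos hL,
      PySem.Int.floordiv_eq_ediv_of_pos hdpos]
    set m0 : Int := (A - 3) * L / (L / B + L / C - 1) with hm0
    set m : Int := if m0 < 0 then 0 else m0 with hm
    have hstart : cntf B C L m < A := by
      rw [hm]
      split_ifs with hneg
      · rw [cnt_zero]; omega
      · exact cnt_est A B C L m0 hA (by omega) (by omega) hL hBL hCL hm0 (by omega)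
    have hmT : m ≤ (T : Int) := by
      by_contra hgt
      have := cnt_mono B C L (by omega) (by omega) hL hBL hCL hlcm
        (m - T).toNat (T : Int) m (by omega) (by omega)
      omega
    exact walk_eq A B C L (T : Int) (by omega) (by omega) hL hBL hCL hlcm hT1 hT2
      (A - cntf B C L m).toNat m (cntf B C L m) (le_refl _) rfl hmT
  rw [hAside, hBside]

theorem solve_spec : Claim_equal_solve := by
  intro A B C _ hPre
  unfold Spec_solve
  rcases hPre with ⟨hB, hC⟩ | ⟨hA2, hmin⟩
  · rcases le_or_gt A 0 with hA0 | hA1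
    · -- A ≤ 0 with positive divisors: A's loop range is empty, B's guard fires
      have hmin1 : (1:Int) ≤ min B C := le_min hB hC
      have hr : A * min B C ≤ 0 := mul_nonpos_of_nonpos_of_nonneg hA0 (by omega)
      have h1 : solve A B C = -1 := by
        unfold solve; rw [solveLoop, dif_neg (by omega)]
      have h2 : solve_alt A B C = -1 := by
        unfold solve_alt; rw [if_pos (Or.inl hA0)]
      rw [h1, h2]
    · exact main_case A B C hA1 hB hC
  · -- A ≥ 2 with a negative divisor: A's loop range is reversed, B's guard fires
    have hr : A * min B C ≤ 2 * min B C := mul_le_mul_of_nonpos_right hA2 (by omega)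
    have h1 : solve A B C = -1 := by
      unfold solve; rw [solveLoop, dif_neg (by omega)]
    have hBC0 : B ≤ 0 ∨ C ≤ 0 := by
      rcases le_total B C with h | h
      · left; have := min_eq_left h; omega
      · right; have := min_eq_right h; omega
    have h2 : solve_alt A B C = -1 := by
      unfold solve_alt
      rw [if_pos (by rcases hBC0 with h | h
                     · exact Or.inr (Or.inl h)
                     · exact Or.inr (Or.inr h))]
    rw [h1, h2]
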